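-- pv_equiv track=rewrite | github.com/taispin/MAC0465 | ep2/ep2.py | pontua
-- ===== SOURCE A (Python) =====
-- def pontua(k,ini,coluna, r, q, g):
--
--     score = 0
--
--     for i in range(k - ini -1):
--         if coluna[ini] == coluna[ini+i+1]:
--             if coluna[ini] == '-':
--                 score = score + 0
--             else:
--                 score = score + r
--         else:
--             if coluna[ini] == '-':
--                 score = score + g
--             elif coluna[ini+i+1] == '-':
--                 score = score + g
--             else:
--                 score = score + q
--     return score
-- ===== SOURCE B (Python) =====
-- def pontua(k, ini, coluna, r, q, g):
--     n = k - ini - 1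
--     if n <= 0:
--         return 0
--     window = coluna[ini + 1:k]
--     freq = {}
--     for x in window:
--         freq[x] = freq.get(x, 0) + 1
--     dashes = freq.get('-', 0)
--     c = coluna[ini]
--     if c == '-':
--         return g * (len(window) - dashes)
--     m = freq.get(c, 0)
--     return r * m + g * dashes + q * (len(window) - m - dashes)
-- ===== Notes on version B (the rewrite author's own statement) =====
-- stated objective: alternative
-- what changed: Replaces A's per-element accumulation loop over indices with slicing out the window, building a frequency table of it once, and computing the score by closed-form arithmetic on the counts.
-- outside the precondition, e.g. on pontua(2, -3, ['a', 'b', 'c'], 1, 2, 3): A returns 7, B returns 2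
import Mathlib
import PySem

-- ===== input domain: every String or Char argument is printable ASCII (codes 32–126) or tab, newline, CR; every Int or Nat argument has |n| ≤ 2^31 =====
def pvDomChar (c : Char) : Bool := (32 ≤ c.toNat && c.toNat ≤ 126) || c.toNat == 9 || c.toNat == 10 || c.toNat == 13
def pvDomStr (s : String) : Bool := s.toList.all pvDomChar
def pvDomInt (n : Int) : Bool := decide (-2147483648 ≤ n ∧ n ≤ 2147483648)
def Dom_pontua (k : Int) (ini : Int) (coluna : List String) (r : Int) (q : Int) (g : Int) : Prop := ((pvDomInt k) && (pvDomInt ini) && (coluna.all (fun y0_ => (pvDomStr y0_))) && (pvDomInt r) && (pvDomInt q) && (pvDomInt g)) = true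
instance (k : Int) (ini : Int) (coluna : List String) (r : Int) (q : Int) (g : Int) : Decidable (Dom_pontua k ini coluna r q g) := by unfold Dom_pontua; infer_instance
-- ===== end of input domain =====

-- B replaces A's per-element accumulation loop with a frequency table of the window and closed-form arithmetic (alternative decomposition, same cost).

-- ===== PORT A =====
def pontua (k : Int) (ini : Int) (coluna : List String) (r : Int) (q : Int) (g : Int) : Int :=
  (PySem.List.pyRange 0 (k - ini - 1) 1).foldl (fun score i =>
    if PySem.List.pyGetD coluna ini "" == PySem.List.pyGetD coluna (ini + i + 1) "" then
      if PySem.List.pyGetD coluna ini "" == "-" then score + 0 else score + r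
    else
      if PySem.List.pyGetD coluna ini "" == "-" then score + g
      else if PySem.List.pyGetD coluna (ini + i + 1) "" == "-" then score + g
      else score + q) 0

-- ===== PORT B =====
def pontua_alt (k : Int) (ini : Int) (coluna : List String) (r : Int) (q : Int) (g : Int) : Int :=
  let n := k - ini - 1
  if n ≤ 0 then 0
  else
    let window := PySem.List.slice coluna (some (ini + 1)) (some k)
    let freq := window.foldl (fun (d : PySem.Dict String Int) x => d.insert x (d.getD x 0 + 1)) PySem.Dict.empty
    let dashes := freq.getD "-" 0
    let c := PySem.List.pyGetD coluna ini ""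
    if c == "-" then g * ((window.length : Int) - dashes)
    else
      let m := freq.getD c 0
      r * m + g * dashes + q * ((window.length : Int) - m - dashes)

-- ===== PRECONDITION & SPEC =====
-- Pre_ excludes inputs where A raises IndexError (an index past the end) and inputs with a
-- negative start index, on which A's Python negative-index wraparound re-reads elements from
-- the front of the list — an accident of Python indexing, not alignment scoring.
def Pre_pontua (k : Int) (ini : Int) (coluna : List String) (r : Int) (q : Int) (g : Int) : Prop :=
  k ≤ ini + 1 ∨ (0 ≤ ini ∧ k ≤ (coluna.length : Int))
instance (k : Int) (ini : Int) (coluna : List String) (r : Int) (q : Int) (g : Int) : Decidable (Pre_pontua k ini coluna r q g) := by unfold Pre_pontua; infer_instance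
def pvWitness_pontua : Int × Int × List String × Int × Int × Int := (3, 0, ["a", "-", "a"], 2, -1, -2)

def Spec_pontua (k : Int) (ini : Int) (coluna : List String) (r : Int) (q : Int) (g : Int) (out : Int) : Prop := out = pontua_alt k ini coluna r q g
instance (k : Int) (ini : Int) (coluna : List String) (r : Int) (q : Int) (g : Int) (out : Int) : Decidable (Spec_pontua k ini coluna r q g out) := by unfold Spec_pontua; infer_instance

-- ===== CLAIM (what is proved, stated in full; the proofs are below) =====
def Claim_equal_pontua : Prop := ∀ (k : Int) (ini : Int) (coluna : List String) (r : Int) (q : Int) (g : Int), Dom_pontua k ini coluna r q g → Pre_pontua k ini coluna r q g → Spec_pontua k ini coluna r q g (pontua k ini coluna r q g)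

-- ===== LEMMAS AND PROOFS =====

-- A's index loop over range(k-ini-1) reads exactly the window slice, element by element.
lemma fold_window (xs : List String) (a : Int) (step : Int → String → Int) :
    ∀ (m : Nat) (init : Int), 0 ≤ a → a + m ≤ (xs.length : Int) →
      (PySem.List.pyRange 0 m 1).foldl (fun s i => step s (PySem.List.pyGetD xs (a + i) "")) init
        = ((xs.drop a.toNat).take m).foldl step init := by
  intro m
  induction m with
  | zero => intro init ha h; simp [PySem.List.pyRange_one_eq_nil]
  | succ m ih =>
    intro init ha h
    have h1 : ((m + 1 : Nat) : Int) = (m : Int) + 1 := by push_cast; ring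
    rw [h1, PySem.List.pyRange_one_succ_right (by positivity), List.foldl_append]
    have hlt : m < (xs.drop a.toNat).length := by
      simp only [List.length_drop]; omega
    have htake : (xs.drop a.toNat).take (m + 1)
        = (xs.drop a.toNat).take m ++ [(xs.drop a.toNat)[m]] := by
      rw [List.take_succ, List.getElem?_eq_getElem hlt]; rfl
    rw [htake, List.foldl_append, ih init ha (by omega)]
    simp only [List.foldl_cons, List.foldl_nil]
    congr 1
    have hget := PySem.List.pyGetD_eq_getElem (xs := xs) (i := a + (m : Int)) (d := "")
      (by omega) (by push_cast at h; omega)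
    rw [hget, List.getElem_drop]
    all_goals (congr 1; omega)

-- closed form of the accumulation when the reference character is '-':
lemma fold_dash (g : Int) : ∀ (w : List String) (s : Int),
    w.foldl (fun s x => if ("-" : String) = x then s + 0 else s + g) s
      = s + g * ((w.length : Int) - (w.count "-" : Int)) := by
  intro w
  induction w with
  | nil => intro s; simp
  | cons x w ih =>
    intro s
    by_cases hx : ("-" : String) = x
    · rw [List.foldl_cons, if_pos hx, ih]
      subst hx
      simp [List.count_cons]
      all_goals (push_cast; ring)
    · rw [List.foldl_cons, if_neg hx, ih]
      have hxd : (x == ("-" : String)) = false := by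
        simp only [beq_eq_false_iff_ne, ne_eq]
        exact fun h => hx h.symm
      simp [List.count_cons, hxd]
      all_goals (push_cast; ring)

-- closed form of the accumulation when the reference character c is not '-':
lemma fold_gen (r q g : Int) (c : String) (hc : c ≠ "-") : ∀ (w : List String) (s : Int),
    w.foldl (fun s x => if c = x then s + r else if x = "-" then s + g else s + q) s
      = s + r * (w.count c : Int) + g * (w.count "-" : Int)
          + q * ((w.length : Int) - (w.count c : Int) - (w.count "-" : Int)) := by
  intro w
  induction w with
  | nil => intro s; simp
  | cons x w ih =>
    intro s
    by_cases h1 : c = x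
    · rw [List.foldl_cons, if_pos h1, ih]
      subst h1
      have hxd : (c == ("-" : String)) = false := by
        simp only [beq_eq_false_iff_ne, ne_eq]; exact hc
      simp [List.count_cons, hxd]
      all_goals (push_cast; ring)
    · rw [List.foldl_cons, if_neg h1]
      have hxc : (x == c) = false := by
        simp only [beq_eq_false_iff_ne, ne_eq]
        exact fun h => h1 h.symm
      by_cases h2 : x = "-"
      · rw [if_pos h2, ih]
        subst h2
        simp [List.count_cons, hxc]
        all_goals (push_cast; ring)
      · rw [if_neg h2, ih]
        have hxd : (x == ("-" : String)) = false := by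
          simp only [beq_eq_false_iff_ne, ne_eq]; exact h2
        simp [List.count_cons, hxc, hxd]
        all_goals (push_cast; ring)

-- B's hand-built frequency dict is Counter: lookup is the multiplicity in the window.
lemma freq_count (w : List String) (v : String) :
    (w.foldl (fun d x => d.insert x (d.getD x 0 + 1)) (PySem.Dict.empty)).getD v 0
      = (w.count v : Int) := by
  rw [PySem.Dict.foldl_insert_getD_add_one_eq_counter, PySem.Dict.getD_counter]

-- ===== VERDICT (by name: the statement is the Claim_ definition above) =====
theorem pontua_spec : Claim_equal_pontua := by
  intro k ini coluna r q g hdom hpre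
  unfold Spec_pontua pontua pontua_alt
  by_cases hn : k - ini - 1 ≤ 0
  · rw [PySem.List.pyRange_one_eq_nil (by omega)]
    simp [hn]
  · have hik : 0 ≤ ini ∧ k ≤ (coluna.length : Int) := by
      rcases hpre with h | h
      · omega
      · exact h
    obtain ⟨hini, hk⟩ := hik
    have hwin : PySem.List.slice coluna (some (ini + 1)) (some k)
        = (coluna.drop (ini + 1).toNat).take ((k - ini - 1).toNat) := by
      have hs := PySem.List.slice_toNat (xs := coluna) (a := ini + 1) (b := k)
        (by omega) (by omega)
      rw [hs]
      congr 1
      omega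
    have hm : k - ini - 1 = (((k - ini - 1).toNat : Nat) : Int) := by omega
    have hfoldA : ∀ (step : Int → String → Int),
        (PySem.List.pyRange 0 (k - ini - 1) 1).foldl
            (fun s i => step s (PySem.List.pyGetD coluna (ini + i + 1) "")) 0
          = ((coluna.drop (ini + 1).toNat).take ((k - ini - 1).toNat)).foldl step 0 := by
      intro step
      have hfw := fold_window coluna (ini + 1) step ((k - ini - 1).toNat) 0 (by omega)
        (by push_cast; omega)
      rw [hm]
      simp only [Int.toNat_natCast]
      rw [← hfw]
      congr 1
      funext s i
      have harg : ini + i + 1 = ini + 1 + i := by ring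
      rw [harg]
    simp only [if_neg hn, hwin, freq_count, beq_iff_eq]
    by_cases hc : PySem.List.pyGetD coluna ini "" = "-"
    · simp only [hc, eq_self_iff_true, ite_true]
      rw [hfoldA (fun s x => if ("-" : String) = x then s + 0 else s + g), fold_dash]
      ring
    · simp only [hc, ite_false]
      rw [hfoldA (fun s x => if PySem.List.pyGetD coluna ini "" = x then s + r
            else if x = "-" then s + g else s + q),
          fold_gen r q g _ hc]
      ring
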